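-- pv_equiv track=rewrite | github.com/RdrigoE/compare_assembler_consensus | get_stats_aligment.py | compare_reference
-- ===== SOURCE A (Python) =====
-- def compare_reference(sequence: str, reference: str):
--     gaps = 0
--     n_s = 0
--     miss_match = 0
--     matches = 0
--     for idx, nt in enumerate(sequence):
--         if idx < len(reference):
--             if nt == reference[idx]:
--                 matches += 1
--             elif nt == "N":
--                 n_s += 1
--             elif nt == "-":
--                 gaps += 1
--             else:
--                 miss_match += 1
--     return [matches, miss_match, n_s, gaps]
-- ===== SOURCE B (Python) =====
-- def compare_reference(sequence: str, reference: str):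
--     # Count-and-subtract decomposition: determine matches once, take raw totals
--     # of 'N' and '-' in the aligned prefix with str.count, subtract the matched
--     # occurrences, and obtain mismatches by arithmetic from the total length.
--     L = min(len(sequence), len(reference))
--     prefix = sequence[:L]
--     matched = [a for a, b in zip(prefix, reference) if a == b]
--     matches = len(matched)
--     n_s = prefix.count("N") - matched.count("N")
--     gaps = prefix.count("-") - matched.count("-")
--     miss_match = L - matches - n_s - gaps
--     return [matches, miss_match, n_s, gaps]
-- ===== Notes on version B (the rewrite author's own statement) =====
-- stated objective: alternative
-- what changed: Replaces A's single classifying loop (4-way if/elif per position) by a count-and-subtract scheme: collect the matched characters once, get raw 'N'/'-' totals of the aligned prefix via str.count, subtract the matched occurrences, and derive the mismatch count arithmetically as L - matches - n_s - gaps.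
import Mathlib
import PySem

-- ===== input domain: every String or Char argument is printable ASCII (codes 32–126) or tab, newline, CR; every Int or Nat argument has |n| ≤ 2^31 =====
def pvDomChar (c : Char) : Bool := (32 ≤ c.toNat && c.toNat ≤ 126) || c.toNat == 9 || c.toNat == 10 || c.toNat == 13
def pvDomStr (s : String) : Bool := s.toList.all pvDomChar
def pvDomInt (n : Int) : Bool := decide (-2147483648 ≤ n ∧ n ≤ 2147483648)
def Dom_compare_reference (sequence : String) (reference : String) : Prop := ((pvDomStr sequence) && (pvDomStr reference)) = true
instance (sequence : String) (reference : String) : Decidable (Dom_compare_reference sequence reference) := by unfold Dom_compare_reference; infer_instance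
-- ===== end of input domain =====

-- B replaces A's classifying loop (4-way if/elif per position) by count-and-subtract:
-- one collection of the matched characters, raw 'N'/'-' totals of the aligned prefix
-- minus their matched occurrences, and the mismatch count by arithmetic from the length.

-- ===== PORT A =====
-- for idx, nt in enumerate(sequence): recursion carrying the index; state (gaps, n_s, mm, mtchs)
def compareRefGo (reference : List Char) : Nat → List Char → (Int × Int × Int × Int) → (Int × Int × Int × Int)
  | _, [], st => st
  | idx, nt :: rest, (gaps, n_s, mm, mtchs) =>
    let st :=
      if idx < reference.length then
        -- reference[idx]: guarded by idx < len(reference), so getD's default is never used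
        if nt = reference.getD idx ' ' then (gaps, n_s, mm, mtchs + 1)
        else if nt = 'N' then (gaps, n_s + 1, mm, mtchs)
        else if nt = '-' then (gaps + 1, n_s, mm, mtchs)
        else (gaps, n_s, mm + 1, mtchs)
      else (gaps, n_s, mm, mtchs)
    compareRefGo reference (idx + 1) rest st

def compare_reference (sequence : String) (reference : String) : List Int :=
  let st := compareRefGo reference.toList 0 sequence.toList (0, 0, 0, 0)
  [st.2.2.2, st.2.2.1, st.2.1, st.1]

-- ===== PORT B =====
-- str.count / list.count on a single character = List.count; sequence[:L] = List.take L
def compare_reference_alt (sequence : String) (reference : String) : List Int :=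
  let L := min sequence.toList.length reference.toList.length
  let pre := sequence.toList.take L
  let matched := ((pre.zip reference.toList).filter (fun p => p.1 == p.2)).map Prod.fst
  let mtchs : Int := matched.length  -- 'matches' is a reserved word in Lean
  let n_s : Int := (pre.count 'N' : Int) - (matched.count 'N' : Int)
  let gaps : Int := (pre.count '-' : Int) - (matched.count '-' : Int)
  let miss_match : Int := (L : Int) - mtchs - n_s - gaps
  [mtchs, miss_match, n_s, gaps]

-- ===== PRECONDITION & SPEC =====
def Spec_compare_reference (sequence : String) (reference : String) (out : List Int) : Prop := out = compare_reference_alt sequence reference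
instance (sequence : String) (reference : String) (out : List Int) : Decidable (Spec_compare_reference sequence reference out) := by unfold Spec_compare_reference; infer_instance

-- ===== CLAIM (what is proved, stated in full; the proofs are below) =====
def Claim_equal_compare_reference : Prop := ∀ (sequence : String) (reference : String), Dom_compare_reference sequence reference → Spec_compare_reference sequence reference (compare_reference sequence reference)

-- ===== LEMMAS AND PROOFS =====

theorem compareRefGo_eq (s r : List Char) :
    ∀ (idx : Nat) (g n mm m : Int),
      compareRefGo r idx s (g, n, mm, m) =
        (g + ((s.zip (r.drop idx)).countP (fun p => p.1 != p.2 && p.1 == '-') : Int),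
         n + ((s.zip (r.drop idx)).countP (fun p => p.1 != p.2 && p.1 == 'N') : Int),
         mm + ((s.zip (r.drop idx)).countP (fun p => p.1 != p.2 && p.1 != 'N' && p.1 != '-') : Int),
         m + ((s.zip (r.drop idx)).countP (fun p => p.1 == p.2) : Int)) := by
  induction s with
  | nil => intro idx g n mm m; simp [compareRefGo]
  | cons nt rest ih =>
    intro idx g n mm m
    by_cases h : idx < r.length
    · have hdrop : r.drop idx = r[idx] :: r.drop (idx + 1) :=
        List.drop_eq_getElem_cons h
      have hgetD : r.getD idx ' ' = r[idx] := by
        simp [List.getD_eq_getElem?_getD, List.getElem?_eq_getElem h]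
      rw [hdrop]
      simp only [compareRefGo, h, if_pos, hgetD, List.zip_cons_cons, List.countP_cons]
      split_ifs with h1 h2 h3 <;>
        (rw [ih]; simp_all) <;> ring
    · have hdrop : r.drop idx = [] := List.drop_eq_nil_of_le (Nat.le_of_not_lt h)
      have hdrop' : r.drop (idx + 1) = [] :=
        List.drop_eq_nil_of_le (Nat.le_trans (Nat.le_of_not_lt h) (Nat.le_succ _))
      simp only [compareRefGo, h, if_neg, not_false_iff, hdrop]
      rw [ih]
      simp [hdrop']

-- taking the aligned prefix before zipping changes nothing (zip truncates)
theorem zip_take_min (a b : List Char) :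
    (a.take (min a.length b.length)).zip b = a.zip b := by
  induction a generalizing b with
  | nil => simp
  | cons x xs ih =>
    cases b with
    | nil => simp
    | cons y ys =>
      simp [Nat.succ_min_succ, ih]

-- count over a char class splits into its matched and unmatched parts
theorem countP_split (l : List (Char × Char)) (c : Char) :
    l.countP (fun p => p.1 == c) =
      l.countP (fun p => p.1 == c && p.1 == p.2) +
        l.countP (fun p => p.1 != p.2 && p.1 == c) := by
  induction l with
  | nil => simp
  | cons p t ih =>
    obtain ⟨x, y⟩ := p
    simp only [List.countP_cons, ih]
    by_cases h2 : x = c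
    · subst h2
      by_cases h1 : x = y
      · subst h1
        simp
        omega
      · simp [h1]
        omega
    · simp [h2]

-- every pair falls in exactly one of the four categories
theorem countP_total (l : List (Char × Char)) :
    l.length =
      l.countP (fun p => p.1 == p.2) +
        l.countP (fun p => p.1 != p.2 && p.1 == 'N') +
        l.countP (fun p => p.1 != p.2 && p.1 == '-') +
        l.countP (fun p => p.1 != p.2 && p.1 != 'N' && p.1 != '-') := by
  induction l with
  | nil => simp
  | cons p t ih =>
    obtain ⟨x, y⟩ := p
    by_cases h1 : x = y
    · subst h1
      simp [ih]
      omega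
    · by_cases h2 : x = 'N'
      · subst h2
        simp [ih, h1]
        omega
      · by_cases h3 : x = '-'
        · subst h3
          simp [ih, h1]
          omega
        · simp [ih, h1, h2, h3]
          omega

-- ===== VERDICT (by name: the statement is the Claim_ definition above) =====
theorem compare_reference_spec : Claim_equal_compare_reference := by
  intro sequence reference _
  unfold Spec_compare_reference compare_reference compare_reference_alt
  rw [compareRefGo_eq]
  simp only [List.drop_zero]
  set a := sequence.toList with ha
  set r := reference.toList with hr
  set L := min a.length r.length with hL
  have hzip : (a.take L).zip r = a.zip r := zip_take_min a r
  set l := a.zip r with hl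
  have hpre : (a.take L).length ≤ r.length := by
    simp [List.length_take]; omega
  have hfst : l.map Prod.fst = a.take L := by
    rw [← hzip]; exact List.map_fst_zip hpre
  have hcount : ∀ c : Char, (a.take L).count c = l.countP (fun p => p.1 == c) := by
    intro c
    rw [← hfst, List.count_eq_countP, List.countP_map]
    rfl
  have hmcount : ∀ c : Char,
      (((((a.take L).zip r).filter (fun p => p.1 == p.2)).map Prod.fst).count c)
        = l.countP (fun p => p.1 == c && p.1 == p.2) := by
    intro c
    rw [hzip, List.count_eq_countP, List.countP_map, List.countP_filter]
    rfl
  have hmlen : ((((a.take L).zip r).filter (fun p => p.1 == p.2)).map Prod.fst).length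
      = l.countP (fun p => p.1 == p.2) := by
    rw [hzip, List.length_map, ← List.countP_eq_length_filter]
  have hlen : l.length = L := by
    rw [hl, List.length_zip]
  have hsplN := countP_split l 'N'
  have hsplD := countP_split l '-'
  have htot := countP_total l
  simp only [hmlen, hmcount, hcount]
  rw [← hlen]
  clear_value l
  clear hl
  simp only [zero_add, List.cons.injEq, and_true]
  exact ⟨trivial, by omega, by omega, by omega⟩
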